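-- pv_equiv track=rewrite | github.com/alexandraback/datacollection | solutions_5636311922769920_0/Python/paimon/fourth.py | solve
-- ===== SOURCE A (Python) =====
-- def solve(size, complexity, budget):
--     if budget * complexity < size:
--         return 'IMPOSSIBLE'
--     result = []
--     mul = 0
--     for i in range(size):
--         if mul == 0:
--             mul = size**(complexity - 1)
--             result.append(0)
--         result[-1] += i * mul
--         mul //= size
--     return ' '.join(str(i + 1) for i in result)
-- ===== SOURCE B (Python) =====
-- def solve(size, complexity, budget):
--     if budget * complexity < size:
--         return 'IMPOSSIBLE'
--     if size <= 0:
--         return ''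
--     pows = []
--     p = 1
--     for _ in range(complexity):
--         pows.append(p)
--         p *= size
--     pows.reverse()
--     parts = []
--     for start in range(0, size, complexity):
--         val = 0
--         for i, pv in zip(range(start, min(start + complexity, size)), pows):
--             val += i * pv
--         parts.append(str(val + 1))
--     return ' '.join(parts)
-- ===== Notes on version B (the rewrite author's own statement) =====
-- stated objective: alternative
-- what changed: Replaces the flat state-machine loop (the mul reset-and-floor-divide trick deciding block boundaries at run time) with an explicit two-level traversal: the descending place values are precomputed once, then an outer loop walks block starts range(0,size,complexity) and an inner zip loop sums each block's base-size value directly.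
-- outside the precondition, e.g. on solve(2, -1, -5): A returns '1.0 1.25', B returns ''
import Mathlib
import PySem

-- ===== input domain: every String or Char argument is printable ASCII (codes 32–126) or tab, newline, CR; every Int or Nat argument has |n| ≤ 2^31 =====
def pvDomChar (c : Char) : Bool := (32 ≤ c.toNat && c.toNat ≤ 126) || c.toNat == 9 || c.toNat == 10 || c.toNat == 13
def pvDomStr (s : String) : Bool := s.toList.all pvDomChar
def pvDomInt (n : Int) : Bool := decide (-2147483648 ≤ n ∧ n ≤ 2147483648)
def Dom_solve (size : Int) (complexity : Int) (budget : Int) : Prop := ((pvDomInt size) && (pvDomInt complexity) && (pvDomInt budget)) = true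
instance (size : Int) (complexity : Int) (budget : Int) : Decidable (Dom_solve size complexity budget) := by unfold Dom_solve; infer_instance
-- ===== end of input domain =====

-- B restructures A's flat state-machine loop into an explicit nested block traversal (alternative decomposition, same cost).

-- ===== PORT A =====
-- result[-1] += v
def addLast : List Int → Int → List Int
  | [], _ => []
  | [x], v => [x + v]
  | x :: y :: xs, v => x :: addLast (y :: xs) v

-- one iteration of A's for-loop body; state = (result, mul)
def stepA (size : Int) (complexity : Int) (st : List Int × Int) (i : Int) : List Int × Int :=
  let st' := if st.2 == 0 then (st.1 ++ [(0 : Int)], size ^ (complexity - 1).toNat) else st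
  (addLast st'.1 (i * st'.2), PySem.Int.floordiv st'.2 size)

def solve (size : Int) (complexity : Int) (budget : Int) : String :=
  if budget * complexity < size then "IMPOSSIBLE"
  else
    let r := (PySem.List.pyRange 0 size 1).foldl (stepA size complexity) ([], 0)
    PySem.Str.join " " (r.1.map (fun i => PySem.Int.toStr (i + 1)))

-- ===== PORT B =====
-- pows loop of Source B: ascending powers of size, then reversed (descending place values)
def powsB (size : Int) (complexity : Int) : List Int :=
  ((PySem.List.pyRange 0 complexity 1).foldl
    (fun (st : List Int × Int) _ => (st.1 ++ [st.2], st.2 * size)) ([], 1)).1.reverse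

-- inner zip loop of Source B: base-size value of the block starting at `start`
def blockValB (size : Int) (complexity : Int) (pows : List Int) (start : Int) : Int :=
  ((PySem.List.pyRange start (min (start + complexity) size) 1).zip pows).foldl
    (fun v ip => v + ip.1 * ip.2) 0

def solve_alt (size : Int) (complexity : Int) (budget : Int) : String :=
  if budget * complexity < size then "IMPOSSIBLE"
  else if size ≤ 0 then ""
  else
    let pows := powsB size complexity
    let parts := (PySem.List.pyRange 0 size complexity).foldl
      (fun acc start => acc ++ [PySem.Int.toStr (blockValB size complexity pows start + 1)]) []
    PySem.Str.join " " parts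

-- ===== PRECONDITION & SPEC =====
-- Pre_ excludes only inputs with size ≥ 1, complexity ≤ -1 and budget*complexity ≥ size, where A's
-- size**(complexity-1) is a Python float and A returns float-formatted strings (not portable integers).
def Pre_solve (size : Int) (complexity : Int) (budget : Int) : Prop :=
  budget * complexity < size ∨ size ≤ 0 ∨ 1 ≤ complexity
instance (size : Int) (complexity : Int) (budget : Int) : Decidable (Pre_solve size complexity budget) := by unfold Pre_solve; infer_instance
def pvWitness_solve : Int × Int × Int := (4, 2, 3)

def Spec_solve (size : Int) (complexity : Int) (budget : Int) (out : String) : Prop := out = solve_alt size complexity budget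
instance (size : Int) (complexity : Int) (budget : Int) (out : String) : Decidable (Spec_solve size complexity budget out) := by unfold Spec_solve; infer_instance

-- ===== CLAIM (what is proved, stated in full; the proofs are below) =====
def Claim_equal_solve : Prop := ∀ (size : Int) (complexity : Int) (budget : Int), Dom_solve size complexity budget → Pre_solve size complexity budget → Spec_solve size complexity budget (solve size complexity budget)

-- ===== LEMMAS AND PROOFS =====

-- the mathematical value of a block of n indices starting at i, top place value size^e
def sumB (size i : Int) (e n : Nat) : Int :=
  ((List.range n).map (fun (t : Nat) => (i + (t : Int)) * size ^ (e - t))).sum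

lemma sumB_succ (size i : Int) (e n : Nat) :
    sumB size i (e + 1) (n + 1) = i * size ^ (e + 1) + sumB size (i + 1) e n := by
  simp only [sumB, List.range_succ_eq_map, List.map_cons, List.sum_cons, List.map_map]
  congr 1
  · push_cast; ring
  · congr 1
    apply List.map_congr_left
    intro t _
    simp only [Function.comp_apply, Nat.succ_sub_succ]
    push_cast; ring

lemma pyRange_pos_nil (a b s : Int) (hs : 0 < s) (h : b ≤ a) :
    PySem.List.pyRange a b s = [] := by
  rw [PySem.List.pyRange_of_pos _ _ hs, if_neg (by omega)]
  simp

lemma pyRange_pos_cons (a b s : Int) (hs : 0 < s) (h : a < b) :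
    PySem.List.pyRange a b s = a :: PySem.List.pyRange (a + s) b s := by
  rw [PySem.List.pyRange_of_pos _ _ hs, PySem.List.pyRange_of_pos _ _ hs]
  by_cases h2 : a + s < b
  · rw [if_pos h, if_pos h2]
    have key : (b - a + s - 1) / s = (b - (a + s) + s - 1) / s + 1 := by
      have e : b - a + s - 1 = (b - (a + s) + s - 1) + 1 * s := by ring
      rw [e, Int.add_mul_ediv_right _ _ (by omega)]
    have hnn : 0 ≤ (b - (a + s) + s - 1) / s := Int.ediv_nonneg (by omega) (by omega)
    have ht : ((b - (a + s) + s - 1) / s + 1).toNat = ((b - (a + s) + s - 1) / s).toNat + 1 := by omega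
    rw [key, ht, List.range_succ_eq_map]
    simp only [List.map_cons, List.map_map]
    congr 1
    · simp
    · apply List.map_congr_left
      intro k _
      simp only [Function.comp_apply]
      push_cast; ring
  · rw [if_pos h, if_neg h2]
    have hone : (b - a + s - 1) / s = 1 := by
      have e : b - a + s - 1 = (b - a - 1) + 1 * s := by ring
      rw [e, Int.add_mul_ediv_right _ _ (by omega), Int.ediv_eq_zero_of_lt (by omega) (by omega)]
      omega
    rw [hone]
    simp

lemma addLast_concat (res : List Int) (v x : Int) :
    addLast (res ++ [v]) x = res ++ [v + x] := by
  induction res with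
  | nil => simp [addLast]
  | cons a l ih =>
    cases l with
    | nil => simp [addLast]
    | cons b l' => simpa [addLast] using ih

lemma pow_div_self (size : Int) (hs : 1 ≤ size) (e : Nat) :
    PySem.Int.floordiv (size ^ (e + 1)) size = size ^ e := by
  rw [PySem.Int.floordiv_eq_ediv_of_pos (by omega), pow_succ, Int.mul_ediv_cancel _ (by omega)]

lemma pow_beq_zero_false (size : Int) (hs : 1 ≤ size) (e : Nat) :
    ((size ^ e : Int) == 0) = false := by
  have : (0 : Int) < size ^ e := pow_pos (by omega) e
  simp [this.ne']

lemma innerA (size c : Int) (hs : 1 ≤ size) :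
    ∀ (n e : Nat) (i v : Int) (res : List Int), n ≤ e + 1 →
      (PySem.List.pyRange i (i + (n : Int)) 1).foldl (stepA size c) (res ++ [v], size ^ e)
        = (res ++ [v + sumB size i e n], PySem.Int.floordiv (size ^ (e + 1 - n)) size) := by
  intro n
  induction n with
  | zero =>
    intro e i v res _
    rw [PySem.List.pyRange_one_eq_nil (by omega)]
    simp only [List.foldl_nil, sumB, List.range_zero, List.map_nil, List.sum_nil, Nat.sub_zero,
      add_zero]
    rw [pow_div_self size hs e]
  | succ n ih =>
    intro e i v res hne
    rw [PySem.List.pyRange_one_cons (by push_cast; omega), List.foldl_cons]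
    have hstep : stepA size c (res ++ [v], size ^ e) i
        = (res ++ [v + i * size ^ e], PySem.Int.floordiv (size ^ e) size) := by
      simp [stepA, pow_beq_zero_false size hs e, addLast_concat]
    rw [hstep]
    cases e with
    | zero =>
      have hn0 : n = 0 := by omega
      subst hn0
      rw [show i + ((1 : Nat) : Int) = i + 1 by push_cast; ring,
        PySem.List.pyRange_one_eq_nil (by omega)]
      simp [sumB]
    | succ e' =>
      rw [pow_div_self size hs e',
        show i + (((n : Nat) + 1 : Nat) : Int) = (i + 1) + (n : Int) by push_cast; ring,
        ih e' (i + 1) (v + i * size ^ (e' + 1)) res (by omega)]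
      rw [Prod.mk.injEq]
      refine ⟨?_, ?_⟩
      · have h : v + i * size ^ (e' + 1) + sumB size (i + 1) e' n = v + sumB size i (e' + 1) (n + 1) := by
          rw [sumB_succ]; ring
        rw [h]
      · congr 2
        omega

lemma blockA (size c : Int) (hs : 1 ≤ size) (hc : 1 ≤ c) (n : Nat) (hn : 1 ≤ n)
    (hnc : (n : Int) ≤ c) (i : Int) (res : List Int) :
    (PySem.List.pyRange i (i + (n : Int)) 1).foldl (stepA size c) (res, 0)
      = (res ++ [sumB size i (c - 1).toNat n],
         PySem.Int.floordiv (size ^ ((c - 1).toNat + 1 - n)) size) := by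
  obtain ⟨m, rfl⟩ : ∃ m, n = m + 1 := ⟨n - 1, by omega⟩
  rw [PySem.List.pyRange_one_cons (by push_cast; omega), List.foldl_cons]
  -- compute the first step directly
  have hstep' : stepA size c (res, 0) i
      = (res ++ [0 + i * size ^ (c - 1).toNat], PySem.Int.floordiv (size ^ (c - 1).toNat) size) := by
    simp [stepA, addLast_concat]
  rw [hstep']
  rcases Nat.eq_zero_or_eq_succ_pred (c - 1).toNat with he0 | he0
  · have hc1 : c = 1 := by omega
    have hm0 : m = 0 := by omega
    subst hm0
    rw [he0, show i + (((0 : Nat) + 1 : Nat) : Int) = i + 1 by push_cast; ring,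
      PySem.List.pyRange_one_eq_nil (by omega)]
    simp [sumB]
  · set e' := (c - 1).toNat - 1 with he'
    have heq : (c - 1).toNat = e' + 1 := by omega
    rw [heq, pow_div_self size hs e',
      show i + (((m : Nat) + 1 : Nat) : Int) = (i + 1) + (m : Int) by push_cast; ring,
      innerA size c hs m e' (i + 1) (0 + i * size ^ (e' + 1)) res (by omega)]
    rw [Prod.mk.injEq]
    refine ⟨?_, ?_⟩
    · have h : 0 + i * size ^ (e' + 1) + sumB size (i + 1) e' m = sumB size i (e' + 1) (m + 1) := by
        rw [sumB_succ]; ring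
      rw [h]
    · congr 2
      omega

lemma outerA (size c : Int) (hs : 1 ≤ size) (hc : 1 ≤ c) :
    ∀ (fuel : Nat) (start : Int) (res : List Int), 0 ≤ start → start < size →
      (size - start).toNat ≤ fuel →
      ((PySem.List.pyRange start size 1).foldl (stepA size c) (res, 0)).1
        = res ++ (PySem.List.pyRange start size c).map
            (fun s => sumB size s (c - 1).toNat (min (s + c) size - s).toNat) := by
  intro fuel
  induction fuel with
  | zero => intro start res h0 h1 h2; omega
  | succ fuel ih =>
    intro start res h0 h1 h2
    by_cases hfull : start + c < size
    · -- full block, more blocks follow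
      have hmin : min (start + c) size = start + c := min_eq_left (by omega)
      have hcast : ((c.toNat : Nat) : Int) = c := by omega
      rw [PySem.List.pyRange_one_append start (start + c) size (by omega) (by omega),
        List.foldl_append,
        show start + c = start + ((c.toNat : Nat) : Int) by omega,
        blockA size c hs hc c.toNat (by omega) (by omega) start res]
      have hexp : (c - 1).toNat + 1 - c.toNat = 0 := by omega
      have hmul : PySem.Int.floordiv (size ^ ((c - 1).toNat + 1 - c.toNat)) size = 0 := by
        rw [hexp, pow_zero, PySem.Int.floordiv_eq_ediv_of_pos (by omega),
          Int.ediv_eq_zero_of_lt (by omega) (by omega)]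
      rw [hmul, show start + ((c.toNat : Nat) : Int) = start + c by omega,
        ih (start + c) (res ++ [sumB size start (c - 1).toNat c.toNat]) (by omega) (by omega)
          (by omega),
        pyRange_pos_cons start size c (by omega) h1]
      simp only [List.map_cons, List.append_assoc, List.cons_append, List.nil_append]
      congr 2
      rw [hmin]
      congr 1
      omega
    · -- final (possibly partial) block
      have hmin : min (start + c) size = size := min_eq_right (by omega)
      set n : Nat := (size - start).toNat with hn
      have hcast : ((n : Nat) : Int) = size - start := by omega
      have hr : PySem.List.pyRange start size 1 = PySem.List.pyRange start (start + ((n : Nat) : Int)) 1 := by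
        rw [show start + ((n : Nat) : Int) = size by omega]
      rw [hr, blockA size c hs hc n (by omega) (by omega) start res,
        pyRange_pos_cons start size c (by omega) h1,
        pyRange_pos_nil (start + c) size c (by omega) (by omega)]
      simp only [List.map_cons, List.map_nil]
      congr 3
      rw [hmin]

lemma foldl_concat_map {α β : Type} (f : α → β) :
    ∀ (l : List α) (acc : List β),
      l.foldl (fun acc x => acc ++ [f x]) acc = acc ++ l.map f := by
  intro l
  induction l with
  | nil => intro acc; simp
  | cons a l ih => intro acc; simp [ih]

lemma zip_trunc {A B : Type} : ∀ (l1 : List A) (l2 : List B),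
    l1.zip l2 = l1.zip (l2.take l1.length) := by
  intro l1
  induction l1 with
  | nil => intro l2; simp
  | cons a l ih =>
    intro l2
    cases l2 with
    | nil => simp
    | cons b t =>
      rw [List.zip_cons_cons, List.length_cons, List.take_succ_cons, List.zip_cons_cons, ← ih]

lemma reverse_map_range (f : Nat → Int) (n : Nat) :
    ((List.range n).map f).reverse = (List.range n).map (fun t => f (n - 1 - t)) := by
  apply List.ext_getElem
  · simp
  · intro i h1 h2
    simp only [List.getElem_reverse, List.getElem_map, List.getElem_range,
      List.length_map, List.length_range]

lemma foldl_add_map {A : Type} (f : A → Int) : ∀ (l : List A) (a : Int),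
    l.foldl (fun v x => v + f x) a = a + (l.map f).sum := by
  intro l
  induction l with
  | nil => intro a; simp
  | cons x l ih =>
    intro a
    rw [List.foldl_cons, ih, List.map_cons, List.sum_cons]
    ring

lemma powsAsc (size : Int) : ∀ (n : Nat) (acc : List Int) (p : Int),
    (PySem.List.pyRange 0 ((n : Nat) : Int) 1).foldl
        (fun (st : List Int × Int) _ => (st.1 ++ [st.2], st.2 * size)) (acc, p)
      = (acc ++ (List.range n).map (fun t => p * size ^ t), p * size ^ n) := by
  intro n
  induction n with
  | zero =>
    intro acc p
    rw [PySem.List.pyRange_one_eq_nil (by omega)]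
    simp
  | succ n ih =>
    intro acc p
    rw [show (((n + 1 : Nat)) : Int) = ((n : Nat) : Int) + 1 by push_cast; ring,
      PySem.List.pyRange_one_succ_right (by omega), List.foldl_append, ih, List.foldl_cons,
      List.foldl_nil]
    rw [Prod.mk.injEq]
    refine ⟨?_, ?_⟩
    · rw [List.range_succ, List.map_append, List.map_cons, List.map_nil, List.append_assoc]
    · rw [pow_succ]; ring

lemma powsB_eq (size c : Int) (hc : 1 ≤ c) :
    powsB size c = (List.range c.toNat).map (fun t => size ^ (c.toNat - 1 - t)) := by
  obtain ⟨n, hn⟩ : ∃ n : Nat, c = (n : Int) := ⟨c.toNat, by omega⟩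
  subst hn
  unfold powsB
  rw [powsAsc size n [] 1]
  simp only [List.nil_append, reverse_map_range, one_mul, Int.toNat_natCast]

lemma blockValB_eq (size c s : Int) (hc : 1 ≤ c) (hss : s ≤ size) :
    blockValB size c (powsB size c) s
      = sumB size s (c - 1).toNat (min (s + c) size - s).toNat := by
  have hK0 : 0 ≤ min (s + c) size - s := by
    rcases le_or_gt (s + c) size with h | h
    · rw [min_eq_left h]; omega
    · rw [min_eq_right (by omega)]; omega
  have hKc : min (s + c) size - s ≤ c := by
    have := min_le_left (s + c) size
    omega
  set k : Nat := (min (s + c) size - s).toNat with hk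
  have hkc : k ≤ c.toNat := by omega
  unfold blockValB
  rw [powsB_eq size c hc,
    show min (s + c) size = s + ((k : Nat) : Int) by omega,
    PySem.List.pyRange_one s (s + ((k : Nat) : Int)),
    show (s + ((k : Nat) : Int) - s).toNat = k by omega,
    zip_trunc, List.length_map, List.length_range, ← List.map_take, List.take_range,
    min_eq_left hkc, List.zip_map', List.foldl_map]
  have hfun : (fun (x : Int) (y : Nat) =>
        x + (s + (y : Int), size ^ (c.toNat - 1 - y)).1 * (s + (y : Int), size ^ (c.toNat - 1 - y)).2)
      = fun (x : Int) (y : Nat) => x + (s + (y : Int)) * size ^ (c.toNat - 1 - y) := rfl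
  rw [hfun, foldl_add_map (fun t : Nat => (s + (t : Int)) * size ^ (c.toNat - 1 - t))
      (List.range k) 0, zero_add]
  unfold sumB
  apply congrArg
  apply List.map_congr_left
  intro t _
  congr 2
  omega

lemma mainpos (size c b : Int) (hs : 1 ≤ size) (hc : 1 ≤ c) (hg : ¬ b * c < size) :
    solve size c b = solve_alt size c b := by
  unfold solve solve_alt
  rw [if_neg hg, if_neg hg, if_neg (by omega : ¬ size ≤ 0)]
  show PySem.Str.join " " (List.map (fun i => PySem.Int.toStr (i + 1))
      ((PySem.List.pyRange 0 size 1).foldl (stepA size c) ([], 0)).1)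
    = PySem.Str.join " " ((PySem.List.pyRange 0 size c).foldl
        (fun acc start => acc ++ [PySem.Int.toStr (blockValB size c (powsB size c) start + 1)]) [])
  rw [foldl_concat_map]
  simp only [List.nil_append]
  rw [outerA size c hs hc size.toNat 0 [] (by omega) (by omega) (by omega)]
  simp only [List.nil_append, List.map_map]
  congr 1
  apply List.map_congr_left
  intro s hsmem
  have hsb := (PySem.List.mem_pyRange_iff_of_pos (by omega : (0 : Int) < c) s).1 hsmem
  simp only [Function.comp_apply]
  rw [blockValB_eq size c s hc (by omega : s ≤ size)]

-- ===== VERDICT (by name: the statement is the Claim_ definition above) =====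
theorem solve_spec : Claim_equal_solve := by
  unfold Claim_equal_solve Spec_solve
  intro size c b _ hpre
  by_cases hg : b * c < size
  · simp [solve, solve_alt, if_pos hg]
  · by_cases hsz : size ≤ 0
    · rw [solve, solve_alt, if_neg hg, if_neg hg, if_pos hsz,
        PySem.List.pyRange_one_eq_nil (by omega : size ≤ (0 : Int))]
      rfl
    · have hc : 1 ≤ c := by
        rcases hpre with h | h | h
        · omega
        · omega
        · exact h
      exact mainpos size c b (by omega) hc hg
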